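-- pv_equiv track=rewrite | github.com/training-ucit/python_grundlagen | trainer/log_reader.py | report_vorbereitung
-- ===== SOURCE A (Python) =====
-- def report_vorbereitung(daten):
--     report_dict = {}
--
--     for line in daten:
--         wort = line[15:22].strip()
--         if not wort in report_dict:
--             report_dict[wort] = []
--         report_dict[wort].append(line)
--
--     return report_dict
-- ===== SOURCE B (Python) =====
-- def report_vorbereitung(daten):
--     # Two-pass: dedup the keys in first-occurrence order, then one filter per key.
--     key = lambda line: line[15:22].strip()
--     keys = list(dict.fromkeys(key(line) for line in daten))
--     return {k: [line for line in daten if key(line) == k] for k in keys}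
-- ===== Notes on version B (the rewrite author's own statement) =====
-- stated objective: alternative
-- what changed: Replaces A's single dict-bucketing pass with a two-pass scheme: dedup the keys line[15:22].strip() in first-occurrence order, then build each group by filtering the whole input per key.
import Mathlib
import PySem

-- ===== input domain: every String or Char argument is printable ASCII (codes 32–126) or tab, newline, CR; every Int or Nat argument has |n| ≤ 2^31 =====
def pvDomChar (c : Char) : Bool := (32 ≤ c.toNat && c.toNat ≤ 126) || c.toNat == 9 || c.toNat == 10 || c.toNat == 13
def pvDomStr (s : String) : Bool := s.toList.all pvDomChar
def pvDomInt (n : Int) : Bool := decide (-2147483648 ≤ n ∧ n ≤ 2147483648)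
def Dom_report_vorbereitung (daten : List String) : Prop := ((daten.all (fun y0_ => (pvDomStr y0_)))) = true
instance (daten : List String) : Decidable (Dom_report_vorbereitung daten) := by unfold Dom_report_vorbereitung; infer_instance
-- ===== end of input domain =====

-- B groups by building the deduplicated key list first and then one filter per key,
-- instead of A's single dict-bucketing pass (objective: alternative decomposition, not faster).


-- ===== PORT A =====
-- wort = line[15:22].strip()
def pvKey (line : String) : String :=
  PySem.Str.strip (PySem.Str.slice line (some 15) (some 22))

def report_vorbereitung (daten : List String) : List (String × List String) :=
  (daten.foldl (fun d line =>
    let wort := pvKey line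
    let d' := if d.contains wort then d else d.insert wort ([] : List String)
    -- report_dict[wort].append(line): the key is now present, so this is d'[wort] = d'[wort] + [line]
    d'.modify wort [] (fun v => v ++ [line])) PySem.Dict.empty).items

-- ===== PORT B =====
def report_vorbereitung_alt (daten : List String) : List (String × List String) :=
  let keys := PySem.List.dedup (daten.map pvKey)   -- list(dict.fromkeys(...)), first-occurrence order
  keys.map (fun k => (k, daten.filter (fun line => pvKey line == k)))

-- ===== PRECONDITION & SPEC =====
def Spec_report_vorbereitung (daten : List String) (out : List (String × List String)) : Prop := out = report_vorbereitung_alt daten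
instance (daten : List String) (out : List (String × List String)) : Decidable (Spec_report_vorbereitung daten out) := by unfold Spec_report_vorbereitung; infer_instance

-- ===== CLAIM (what is proved, stated in full; the proofs are below) =====
def Claim_equal_report_vorbereitung : Prop := ∀ (daten : List String), Dom_report_vorbereitung daten → Spec_report_vorbereitung daten (report_vorbereitung daten)

-- ===== LEMMAS AND PROOFS =====

-- A's "insert [] if absent, then append" step is exactly Dict.modify with default [].
theorem pv_step_eq (d : PySem.Dict String (List String)) (line : String) :
    (let wort := pvKey line
     let d' := if d.contains wort then d else d.insert wort ([] : List String)
     d'.modify wort [] (fun v => v ++ [line]))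
    = d.modify (pvKey line) [] (fun v => v ++ [line]) := by
  by_cases h : d.contains (pvKey line)
  · simp [h]
  · have hc : d.contains (pvKey line) = false := by simpa using h
    simp only [hc, Bool.false_eq_true, if_false, PySem.Dict.modify,
      PySem.Dict.getD_insert_self, PySem.Dict.insert_insert_self,
      PySem.Dict.getD_of_not_contains d _ hc, List.nil_append]

-- A's loop is the canonical grouping fold over (key, line) pairs.
theorem pv_fold_eq (daten : List String) :
    daten.foldl (fun d line =>
      let wort := pvKey line
      let d' := if d.contains wort then d else d.insert wort ([] : List String)
      d'.modify wort [] (fun v => v ++ [line])) PySem.Dict.empty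
    = (daten.map (fun line => (pvKey line, line))).foldl
        (fun d p => d.modify p.1 [] (fun v => v ++ [p.2])) PySem.Dict.empty := by
  rw [List.foldl_map]
  exact PySem.List.foldl_congr_mem daten _ _ _ (fun d line _ => pv_step_eq d line)

theorem report_vorbereitung_spec : Claim_equal_report_vorbereitung := by
  intro daten _
  unfold Spec_report_vorbereitung report_vorbereitung report_vorbereitung_alt
  rw [pv_fold_eq]
  set l := daten.map (fun line => (pvKey line, line)) with hl
  have hnd : ((l.foldl (fun d p => d.modify p.1 [] (fun v => v ++ [p.2])) PySem.Dict.empty).keys).Nodup :=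
    PySem.Dict.nodup_keys_foldl_modify_key l Prod.fst [] (fun _ p v => v ++ [p.2]) PySem.Dict.empty (by simp)
  rw [PySem.Dict.items_eq_map_keys _ hnd []]
  have hkeys : (l.foldl (fun d p => d.modify p.1 [] (fun v => v ++ [p.2])) PySem.Dict.empty).keys
      = PySem.List.dedup (daten.map pvKey) := by
    rw [PySem.Dict.keys_foldl_modify_key l Prod.fst [] (fun _ p v => v ++ [p.2]) PySem.Dict.empty,
      PySem.List.dedup_eq_ofList]
    simp [hl, PySem.Set.update_nil_left, List.map_map, Function.comp_def]
  rw [hkeys]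
  apply List.map_congr_left
  intro k _
  rw [PySem.Dict.getD_foldl_modify_append l PySem.Dict.empty k]
  simp [hl, List.filter_map, List.map_map, Function.comp_def]
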